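-- pv_equiv track=rewrite | github.com/cparrapa/micropythonlibs | code examples/games/oled_tetris.py | rotate_all
-- ===== SOURCE A (Python) =====
-- def rotate_all(shape):
--     rotations = [shape]
--     for _ in range(3):
--         shape = [(-y, x) for x, y in shape]
--         min_x = min(x for x, y in shape)
--         min_y = min(y for x, y in shape)
--         norm = [(x - min_x, y - min_y) for x, y in shape]
--         rotations.append(norm)
--     return rotations
-- ===== SOURCE B (Python) =====
-- def rotate_all(shape):
--     # Bounding-box method: compute min/max of x and y of the ORIGINAL shape once,
--     # then each normalized rotation is a single closed-form map (no per-rotation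
--     # rotated intermediate list, no per-rotation min scans).
--     min_x = min(x for x, y in shape)
--     max_x = max(x for x, y in shape)
--     min_y = min(y for x, y in shape)
--     max_y = max(y for x, y in shape)
--     return [shape,
--             [(max_y - y, x - min_x) for x, y in shape],
--             [(max_x - x, max_y - y) for x, y in shape],
--             [(y - min_y, max_x - x) for x, y in shape]]
-- ===== Notes on version B (the rewrite author's own statement) =====
-- stated objective: alternative
-- what changed: Replaces the iterative rotate-then-normalize accumulator loop with a bounding-box method: compute min/max of x and y of the original shape once, then produce each normalized rotation directly by a single closed-form map (e.g. 90deg point is (max_y - y, x - min_x)), with no intermediate rotated lists and no per-rotation min scans.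
-- outside the precondition, e.g. on rotate_all([]): A raises ValueError, B raises ValueError
import Mathlib
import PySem

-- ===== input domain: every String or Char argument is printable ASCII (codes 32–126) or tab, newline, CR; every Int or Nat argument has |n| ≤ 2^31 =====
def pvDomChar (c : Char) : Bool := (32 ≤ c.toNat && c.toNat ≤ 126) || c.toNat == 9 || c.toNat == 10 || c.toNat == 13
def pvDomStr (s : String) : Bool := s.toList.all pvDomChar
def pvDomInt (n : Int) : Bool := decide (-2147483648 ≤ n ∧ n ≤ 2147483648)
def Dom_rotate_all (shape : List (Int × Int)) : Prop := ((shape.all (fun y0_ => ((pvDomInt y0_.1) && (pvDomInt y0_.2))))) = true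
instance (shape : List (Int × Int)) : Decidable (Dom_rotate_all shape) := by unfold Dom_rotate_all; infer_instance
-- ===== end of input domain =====

-- B replaces A's iterative rotate-then-normalize accumulator loop by the bounding-box
-- method: min/max of x and y of the original shape are computed once, and each
-- normalized rotation is emitted by one closed-form map (objective: alternative).

-- ===== PORT A =====
-- one iteration of A's loop body: rotate the working shape, normalize, append
def rotate_all_step (st : List (Int × Int) × List (List (Int × Int))) (_i : Int) :
    List (Int × Int) × List (List (Int × Int)) :=
  let s := st.1.map (fun p => (-p.2, p.1))
  let min_x := (PySem.List.min? (s.map (fun p => p.1)) (fun v => v)).getD 0  -- Pre_ excludes the empty shape (Python min raises there)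
  let min_y := (PySem.List.min? (s.map (fun p => p.2)) (fun v => v)).getD 0
  let norm := s.map (fun p => (p.1 - min_x, p.2 - min_y))
  (s, st.2 ++ [norm])

def rotate_all (shape : List (Int × Int)) : List (List (Int × Int)) :=
  ((PySem.List.pyRange 0 3 1).foldl rotate_all_step (shape, [shape])).2

-- ===== PORT B =====
def rotate_all_alt (shape : List (Int × Int)) : List (List (Int × Int)) :=
  let min_x := (PySem.List.min? (shape.map (fun p => p.1)) (fun v => v)).getD 0  -- Pre_ excludes the empty shape
  let max_x := (PySem.List.max? (shape.map (fun p => p.1)) (fun v => v)).getD 0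
  let min_y := (PySem.List.min? (shape.map (fun p => p.2)) (fun v => v)).getD 0
  let max_y := (PySem.List.max? (shape.map (fun p => p.2)) (fun v => v)).getD 0
  [shape,
   shape.map (fun p => (max_y - p.2, p.1 - min_x)),
   shape.map (fun p => (max_x - p.1, max_y - p.2)),
   shape.map (fun p => (p.2 - min_y, max_x - p.1))]

-- ===== PRECONDITION & SPEC =====
-- Pre_ excludes only the empty shape, on which Python's min/max (in both A and B) raise ValueError.
def Pre_rotate_all (shape : List (Int × Int)) : Prop := shape ≠ []
instance (shape : List (Int × Int)) : Decidable (Pre_rotate_all shape) := by unfold Pre_rotate_all; infer_instance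
def pvWitness_rotate_all : (List (Int × Int)) := [(0, 0), (1, 0), (1, 1)]
def Spec_rotate_all (shape : List (Int × Int)) (out : List (List (Int × Int))) : Prop := out = rotate_all_alt shape
instance (shape : List (Int × Int)) (out : List (List (Int × Int))) : Decidable (Spec_rotate_all shape out) := by unfold Spec_rotate_all; infer_instance

-- ===== CLAIM (what is proved, stated in full; the proofs are below) =====
def Claim_equal_rotate_all : Prop := ∀ (shape : List (Int × Int)), Dom_rotate_all shape → Pre_rotate_all shape → Spec_rotate_all shape (rotate_all shape)

-- ===== LEMMAS AND PROOFS =====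

theorem foldl_min_neg (l : List Int) (a : Int) :
    (l.map Neg.neg).foldl min (-a) = -(l.foldl max a) := by
  induction l generalizing a with
  | nil => rfl
  | cons b t ih =>
    simp only [List.map_cons, List.foldl_cons]
    have h : min (-a) (-b) = -(max a b) := by omega
    rw [h, ih]

-- min of the negation of a projection over a nonempty list is the negation of its max
theorem min_neg_eq_neg_max (f : (Int × Int) → Int) (q : Int × Int) (t : List (Int × Int)) :
    (PySem.List.min? ((q :: t).map (fun p => -(f p))) (fun v => v)).getD 0
      = -((PySem.List.max? ((q :: t).map f) (fun v => v)).getD 0) := by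
  have h1 : (q :: t).map (fun p => -(f p)) = (-(f q)) :: ((t.map f).map Neg.neg) := by
    simp [List.map_map, Function.comp]
  have h2 : (q :: t).map f = (f q) :: (t.map f) := by simp
  rw [h1, h2, PySem.List.min?_id_cons, PySem.List.max?_id_cons]
  simpa [List.map_map] using foldl_min_neg (t.map f) (f q)

-- ===== VERDICT (by name: the statement is the Claim_ definition above) =====
theorem rotate_all_spec : Claim_equal_rotate_all := by
  intro shape _ hne
  show rotate_all shape = rotate_all_alt shape
  obtain ⟨q, t, rfl⟩ : ∃ q t, shape = q :: t := by
    cases shape with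
    | nil => exact absurd rfl hne
    | cons q t => exact ⟨q, t, rfl⟩
  have hr : PySem.List.pyRange 0 3 1 = [0, 1, 2] := by decide
  simp only [rotate_all, hr, List.foldl, rotate_all_step, rotate_all_alt, List.map_map,
    Function.comp_def]
  simp only [neg_neg]
  rw [min_neg_eq_neg_max (fun p => p.2) q t, min_neg_eq_neg_max (fun p => p.1) q t]
  simp only [List.cons_append, List.nil_append]
  refine congrArg₂ List.cons rfl (congrArg₂ List.cons ?_ (congrArg₂ List.cons ?_
    (congrArg₂ List.cons ?_ rfl))) <;>
  · refine congrFun (congrArg List.map (funext fun p => ?_)) _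
    rw [Prod.mk.injEq]
    constructor <;> ring
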